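-- pv_equiv track=rewrite | github.com/MattBrawley/SeniorProjects | MOO.py | unique_combinations_from_value_counts
-- ===== SOURCE A (Python) =====
-- import itertools
--
-- def repeat_chain(values, counts):
--     return itertools.chain.from_iterable(map(itertools.repeat, values, counts))
--
-- def unique_combinations_from_value_counts(values, counts, r):
--     n = len(counts)
--     indices = list(itertools.islice(repeat_chain(itertools.count(), counts), r))
--     if len(indices) < r:
--         return
--     while True:
--         yield tuple(values[i] for i in indices)
--         for i, j in zip(reversed(range(r)), repeat_chain(reversed(range(n)), reversed(counts))):
--             if indices[i] != j:
--                 break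
--         else:
--             return
--         j = indices[i] + 1
--         for i, j in zip(range(i, r), repeat_chain(itertools.count(j), counts[j:])):
--             indices[i] = j
-- ===== SOURCE B (Python) =====
-- def unique_combinations_from_value_counts(values, counts, r):
--     # Recursive generator over distinct values: choose how many copies k of each
--     # value to take, from min(remaining, cap) down to the feasibility lower bound.
--     items = [(v, max(c, 0)) for v, c in zip(values, counts)]
--     n = len(items)
--     suffix = [0] * (n + 1)
--     for i in range(n - 1, -1, -1):
--         suffix[i] = suffix[i + 1] + items[i][1]
--
--     def rec(i, remaining, prefix):
--         if remaining == 0: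
--             yield tuple(prefix)
--             return
--         if i == n:
--             return
--         v, cap = items[i]
--         hi = min(remaining, cap)
--         lo = max(0, remaining - suffix[i + 1])
--         for k in range(hi, lo - 1, -1):
--             yield from rec(i + 1, remaining - k, prefix + (v,) * k)
--
--     yield from rec(0, r, ())
-- ===== Notes on version B (the rewrite author's own statement) =====
-- stated objective: alternative
-- what changed: A materialises an index vector and repeatedly advances it with an odometer-style successor scan (compare against the maximal reversed chain, then refill the suffix); B instead enumerates directly by a recursive generator over distinct values, choosing the multiplicity k of each value from min(remaining, cap) down to the suffix-capacity lower bound, which reproduces A's exact lexicographic yield order with no successor computation.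
import Mathlib
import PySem

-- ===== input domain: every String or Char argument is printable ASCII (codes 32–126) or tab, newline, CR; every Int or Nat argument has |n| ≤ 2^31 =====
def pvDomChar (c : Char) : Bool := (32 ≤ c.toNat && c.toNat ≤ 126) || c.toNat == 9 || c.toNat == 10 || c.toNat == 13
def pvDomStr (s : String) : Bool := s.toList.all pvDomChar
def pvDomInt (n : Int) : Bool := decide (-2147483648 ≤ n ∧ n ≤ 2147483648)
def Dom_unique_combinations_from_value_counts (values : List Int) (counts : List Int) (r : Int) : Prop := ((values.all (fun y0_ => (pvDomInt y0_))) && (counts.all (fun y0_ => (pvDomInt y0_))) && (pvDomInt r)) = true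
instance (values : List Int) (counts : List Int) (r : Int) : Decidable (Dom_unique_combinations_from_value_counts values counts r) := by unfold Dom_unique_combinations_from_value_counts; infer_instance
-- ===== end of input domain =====

-- B replaces A's odometer (a materialised index vector advanced by a reversed
-- mismatch scan and a suffix refill) by a direct recursive enumeration over
-- distinct values that chooses each multiplicity top-down; same outputs in the
-- same order (the ports compute the list the Python generators yield).

-- ===== PORT A =====

-- islice(repeat_chain(count(idx), counts), rem): first `rem` items of the chain
-- idx repeated counts[0] times, idx+1 repeated counts[1] times, …
def pvTakeRC (idx rem : Nat) : List Int → List Nat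
  | [] => []
  | c :: cs => List.replicate (min rem c.toNat) idx ++ pvTakeRC (idx + 1) (rem - min rem c.toNat) cs

-- first `rem` items of repeat_chain(reversed(range(idx+1)), counts): idx, idx-1, …
def pvMaxRev (idx rem : Nat) : List Int → List Nat
  | [] => []
  | c :: cs => List.replicate (min rem c.toNat) idx ++ pvMaxRev (idx - 1) (rem - min rem c.toNat) cs

-- A's inner `for i, j in zip(reversed(range(r)), …)` scan: first position k
-- (counted from the right end) where indices and the maximal chain disagree,
-- together with the chain value j there (none = the else-branch, i.e. return).
def pvFindMismatch : List Nat → List Nat → Option (Nat × Nat)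
  | a :: as, b :: bs =>
    if a ≠ b then some (0, b) else (pvFindMismatch as bs).map (fun p => (p.1 + 1, p.2))
  | _, _ => none

-- one pass of A's while-loop after the yield: find the break position, bump, refill
def pvStepA (counts : List Int) (r' n : Nat) (indices : List Nat) : Option (List Nat) :=
  match pvFindMismatch indices.reverse (pvMaxRev (n - 1) r' counts.reverse) with
  | none => none
  | some (k, _) =>
    let i := r' - 1 - k
    let j := indices.getD i 0 + 1
    let s := pvTakeRC j (r' - i) (counts.drop j)
    some (indices.take i ++ s ++ indices.drop (i + s.length))

-- A's `while True`; the fuel argument is only a totality guard (proved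
-- sufficient below); values.getD i 0 totalises values[i] (in range on Pre_).
def pvLoopA (values counts : List Int) (r' n : Nat) : Nat → List Nat → List (List Int)
  | 0, _ => []
  | fuel + 1, indices =>
    let out := indices.map (fun i => values.getD i 0)
    match pvStepA counts r' n indices with
    | none => [out]
    | some ind' => out :: pvLoopA values counts r' n fuel ind'

def unique_combinations_from_value_counts (values : List Int) (counts : List Int) (r : Int) : List (List Int) :=
  if (pvTakeRC 0 r.toNat counts).length < r.toNat then []
  else pvLoopA values counts r.toNat counts.length
    (counts.foldl (fun a c => a * (min c.toNat r.toNat + 1)) 1) (pvTakeRC 0 r.toNat counts)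

-- ===== PORT B =====

-- items = [(v, max(c, 0)) for v, c in zip(values, counts)]
def pvItems (values counts : List Int) : List (Int × Nat) :=
  (values.zip counts).map (fun p => (p.1, p.2.toNat))

-- attach to each item the total capacity of the items after it (Source B's suffix sums)
def pvAnnot : List (Int × Nat) → List (Int × Nat × Nat)
  | [] => []
  | (v, c) :: rest => (v, c, (rest.map (fun p => p.2)).sum) :: pvAnnot rest

-- rec(i, remaining, prefix); Python's range(hi, lo-1, -1) is ported as the
-- k = hi - t descending scan over List.range
def pvRecB : List (Int × Nat × Nat) → Nat → List Int → List (List Int)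
  | _, 0, pref => [pref]
  | [], _ + 1, _ => []
  | (v, cap, suf) :: rest, rem + 1, pref =>
    ((List.range (min (rem + 1) cap + 1 - (rem + 1 - suf))).map
        (fun t => min (rem + 1) cap - t)).flatMap
      (fun k => pvRecB rest (rem + 1 - k) (pref ++ List.replicate k v))

def unique_combinations_from_value_counts_alt (values : List Int) (counts : List Int) (r : Int) : List (List Int) :=
  if r < 0 then [] else pvRecB (pvAnnot (pvItems values counts)) r.toNat []

-- ===== PRECONDITION & SPEC =====
-- Pre_ excludes exactly the inputs on which A raises: r < 0 (ValueError from
-- islice) and feasible r ≥ 1 with some positive-count value index out of range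
-- of values (IndexError while a tuple is yielded).
def Pre_unique_combinations_from_value_counts (values : List Int) (counts : List Int) (r : Int) : Prop :=
  0 ≤ r ∧ (r = 0 ∨ (((counts.map Int.toNat).sum : Int) < r ∨
    ∀ i : Nat, i < counts.length → (0 : Int) < counts.getD i 0 → i < values.length))

instance (values : List Int) (counts : List Int) (r : Int) : Decidable (Pre_unique_combinations_from_value_counts values counts r) := by
  unfold Pre_unique_combinations_from_value_counts; infer_instance

def pvWitness_unique_combinations_from_value_counts : List Int × List Int × Int := ([10, 20], [1, 2], 2)

def Spec_unique_combinations_from_value_counts (values : List Int) (counts : List Int) (r : Int) (out : List (List Int)) : Prop := out = unique_combinations_from_value_counts_alt values counts r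
instance (values : List Int) (counts : List Int) (r : Int) (out : List (List Int)) : Decidable (Spec_unique_combinations_from_value_counts values counts r out) := by unfold Spec_unique_combinations_from_value_counts; infer_instance

-- ===== CLAIM (what is proved, stated in full; the proofs are below) =====
def Claim_equal_unique_combinations_from_value_counts : Prop := ∀ (values : List Int) (counts : List Int) (r : Int), Dom_unique_combinations_from_value_counts values counts r → Pre_unique_combinations_from_value_counts values counts r → Spec_unique_combinations_from_value_counts values counts r (unique_combinations_from_value_counts values counts r)


-- ===== LEMMAS AND PROOFS =====

def tkN (idx rem : Nat) : List Nat → List Nat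
  | [] => []
  | c :: cs => List.replicate (min rem c) idx ++ tkN (idx + 1) (rem - min rem c) cs

theorem pvTakeRC_eq_tkN (l : List Int) : ∀ idx rem, pvTakeRC idx rem l = tkN idx rem (l.map Int.toNat) := by
  induction l with
  | nil => intro idx rem; rfl
  | cons c cs ih => intro idx rem; simp [pvTakeRC, tkN, ih]

theorem tkN_zero (l : List Nat) : ∀ idx, tkN idx 0 l = [] := by
  induction l with
  | nil => intro idx; rfl
  | cons c cs ih => intro idx; simp [tkN, ih]

theorem tkN_shift (l : List Nat) : ∀ idx b rem, tkN (idx + b) rem l = (tkN idx rem l).map (· + b) := by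
  induction l with
  | nil => intros; rfl
  | cons c cs ih =>
    intro idx b rem
    simp [tkN, List.map_append, ← ih, Nat.add_right_comm]

theorem tkN_length (l : List Nat) : ∀ idx rem, (tkN idx rem l).length = min rem l.sum := by
  induction l with
  | nil => intros; simp [tkN]
  | cons c cs ih => intro idx rem; simp [tkN, ih]; omega

theorem tkN_append (l₁ l₂ : List Nat) : ∀ idx rem,
    tkN idx rem (l₁ ++ l₂) = tkN idx rem l₁ ++ tkN (idx + l₁.length) (rem - l₁.sum) l₂ := by
  induction l₁ with
  | nil => intros; simp [tkN]
  | cons c cs ih =>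
    intro idx rem
    simp [tkN, ih, Nat.add_assoc, Nat.add_comm 1 cs.length]
    have h : rem - min rem c - cs.sum = rem - (c + cs.sum) := by omega
    rw [h]

theorem tkN_take (l : List Nat) : ∀ idx rem m, m ≤ rem → (tkN idx rem l).take m = tkN idx m l := by
  induction l with
  | nil => intros; simp [tkN]
  | cons c cs ih =>
    intro idx rem m h
    simp [tkN, List.take_append]
    rcases Nat.lt_or_ge m c with h1 | h1
    · have h2 : m - min rem c = 0 := by omega
      rw [h2, ih _ _ 0 (by omega), tkN_zero]
      have h3 : m - min m c = 0 := by omega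
      rw [h3, tkN_zero]
      congr 1
      simp [Nat.min_def]
      split_ifs <;> omega
    · rw [ih _ _ _ (by omega)]
      congr 2 <;> omega

theorem tkN_entry_lt (l : List Nat) : ∀ idx rem t, t ∈ tkN idx rem l → idx ≤ t ∧ t < idx + l.length := by
  induction l with
  | nil => intros _ _ _ h; simp [tkN] at h
  | cons c cs ih =>
    intro idx rem t h
    simp [tkN] at h
    rcases h with ⟨_, h⟩ | h
    · simp; omega
    · have := ih _ _ _ h
      simp; omega

theorem pvMaxRev_eq (l : List Int) : ∀ idx rem, pvMaxRev idx rem l = (tkN 0 rem (l.map Int.toNat)).map (fun t => idx - t) := by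
  induction l with
  | nil => intros; rfl
  | cons c cs ih =>
    intro idx rem
    have h1 := tkN_shift (cs.map Int.toNat) 0 1 (rem - min rem c.toNat)
    simp only [Nat.zero_add] at h1
    have h2 : List.map (fun t => idx - t) (List.map (fun x => x + 1) (tkN 0 (rem - min rem c.toNat) (List.map Int.toNat cs))) = List.map (fun t => idx - 1 - t) (tkN 0 (rem - min rem c.toNat) (List.map Int.toNat cs)) := by
      rw [List.map_map]
      apply List.map_congr_left
      intro a _
      simp only [Function.comp_apply]
      omega
    simp only [pvMaxRev, tkN, List.map_cons, List.map_append, List.map_replicate, h1, h2, ih]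
    simp

theorem fm_self (a : List Nat) : ∀ b, a <+: b → pvFindMismatch a b = none := by
  induction a with
  | nil => intro b _; cases b <;> rfl
  | cons x as ih =>
    intro b h
    rcases h with ⟨t, ht⟩
    subst ht
    simp [pvFindMismatch, ih (as ++ t) ⟨t, rfl⟩]

theorem fm_append_eq (a : List Nat) : ∀ b c, pvFindMismatch (a ++ b) (a ++ c) = (pvFindMismatch b c).map (fun p => (p.1 + a.length, p.2)) := by
  induction a with
  | nil => intro b c; cases h : pvFindMismatch b c <;> simp [h]
  | cons x as ih =>
    intro b c
    simp [pvFindMismatch, ih]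
    cases h : pvFindMismatch b c <;> simp [Nat.add_assoc]

theorem fm_some_append (a b : List Nat) (p : Nat × Nat) : ∀ x y, pvFindMismatch a b = some p → pvFindMismatch (a ++ x) (b ++ y) = some p := by
  induction a generalizing b p with
  | nil => intro x y h; cases b <;> simp [pvFindMismatch] at h
  | cons u as ih =>
    intro x y h
    cases b with
    | nil => simp [pvFindMismatch] at h
    | cons v bs =>
      by_cases huv : u = v
      · subst huv
        simp [pvFindMismatch] at h ⊢
        cases h2 : pvFindMismatch as bs with
        | none => rw [h2] at h; simp at h
        | some q =>
          rw [h2] at h; simp at h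
          rw [ih bs q x y h2]
          simpa using h
      · simp [pvFindMismatch, huv] at h ⊢
        exact h

theorem fm_some_lt (a : List Nat) : ∀ b p, pvFindMismatch a b = some p → p.1 < a.length ∧ p.1 < b.length := by
  induction a with
  | nil => intro b p h; cases b <;> simp [pvFindMismatch] at h
  | cons u as ih =>
    intro b p h
    cases b with
    | nil => simp [pvFindMismatch] at h
    | cons v bs =>
      by_cases huv : u = v
      · subst huv
        simp [pvFindMismatch] at h
        cases h2 : pvFindMismatch as bs with
        | none => rw [h2] at h; simp at h
        | some q =>
          rw [h2] at h; simp at h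
          have hq := ih bs q h2
          obtain ⟨a, b, hq1, hp⟩ := h
          subst hp; subst hq1
          simp at hq ⊢
          omega
      · simp [pvFindMismatch, huv] at h
        subst h
        simp

theorem fm_none_eq (a : List Nat) : ∀ b, pvFindMismatch a b = none → a.length = b.length → a = b := by
  induction a with
  | nil => intro b _ hl; cases b; rfl; simp at hl
  | cons u as ih =>
    intro b h hl
    cases b with
    | nil => simp at hl
    | cons v bs =>
      by_cases huv : u = v
      · subst huv
        simp [pvFindMismatch] at h
        cases h2 : pvFindMismatch as bs with
        | none => simp at hl; rw [ih bs h2 hl]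
        | some q => rw [h2] at h; simp at h
      · simp [pvFindMismatch, huv] at h

theorem fm_map_succ (a : List Nat) : ∀ b, pvFindMismatch (a.map (· + 1)) (b.map (· + 1)) = (pvFindMismatch a b).map (fun p => (p.1, p.2 + 1)) := by
  induction a with
  | nil => intro b; cases b <;> rfl
  | cons u as ih =>
    intro b
    cases b with
    | nil => rfl
    | cons v bs =>
      by_cases huv : u = v
      · subst huv
        simp [pvFindMismatch, ih]
        cases pvFindMismatch as bs <;> simp
      · simp [pvFindMismatch, huv]

def stpN (caps : List Nat) (rem : Nat) (x : List Nat) : Option (List Nat) :=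
  match pvFindMismatch x.reverse ((tkN 0 rem caps.reverse).map (fun t => caps.length - 1 - t)) with
  | none => none
  | some (k, _) =>
    let i := rem - 1 - k
    let j := x.getD i 0 + 1
    let s := tkN j (rem - i) (caps.drop j)
    some (x.take i ++ s ++ x.drop (i + s.length))

theorem pvStepA_eq_stpN (counts : List Int) (r' : Nat) (x : List Nat) :
    pvStepA counts r' counts.length x = stpN (counts.map Int.toNat) r' x := by
  unfold pvStepA stpN
  rw [pvMaxRev_eq]
  have e1 : (counts.reverse.map Int.toNat) = (counts.map Int.toNat).reverse := by simp
  have e2 : (counts.map Int.toNat).length = counts.length := by simp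
  rw [e1, e2]
  cases pvFindMismatch x.reverse ((tkN 0 r' ((counts.map Int.toNat).reverse)).map fun t => counts.length - 1 - t) with
  | none => rfl
  | some p =>
    simp only [pvTakeRC_eq_tkN, List.map_drop]

def EnN : List Nat → Nat → List (List Nat)
  | _, 0 => [[]]
  | [], _ + 1 => []
  | c :: cs, rem + 1 =>
    ((List.range (min (rem + 1) c + 1 - (rem + 1 - cs.sum))).map
        (fun t => min (rem + 1) c - t)).flatMap
      (fun k => (EnN cs (rem + 1 - k)).map (fun u => List.replicate k 0 ++ u.map (· + 1)))

theorem EnN_len (caps : List Nat) : ∀ m x, x ∈ EnN caps m → x.length = m := by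
  induction caps with
  | nil =>
    intro m x h
    cases m with
    | zero => simp [EnN] at h; simp [h]
    | succ m => simp [EnN] at h
  | cons c cs ih =>
    intro m x h
    cases m with
    | zero => simp [EnN] at h; simp [h]
    | succ m =>
      simp only [EnN, List.mem_flatMap, List.mem_map] at h
      obtain ⟨k, hk, u, hu, hx⟩ := h
      subst hx
      obtain ⟨t, ht, rfl⟩ := hk
      have h2 := ih _ _ hu
      simp [h2]

theorem EnN_entry_lt (caps : List Nat) : ∀ m x t, x ∈ EnN caps m → t ∈ x → t < caps.length := by
  induction caps with
  | nil =>
    intro m x t h ht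
    cases m with
    | zero => simp [EnN] at h; subst h; simp at ht
    | succ m => simp [EnN] at h
  | cons c cs ih =>
    intro m x t h ht
    cases m with
    | zero => simp [EnN] at h; subst h; simp at ht
    | succ m =>
      simp only [EnN, List.mem_flatMap, List.mem_map] at h
      obtain ⟨k, hk, u, hu, hx⟩ := h
      subst hx
      simp at ht
      rcases ht with ⟨_, h0⟩ | ⟨a, ha, rfl⟩
      · simp; omega
      · have := ih _ _ _ hu ha
        simp
        omega

def dseqC : Nat → Nat → List Nat
  | _, 0 => []
  | hi, n + 1 => hi :: dseqC (hi - 1) n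

theorem range_map_sub (n : Nat) : ∀ hi, (List.range n).map (fun t => hi - t) = dseqC hi n := by
  induction n with
  | zero => intro hi; rfl
  | succ n ih =>
    intro hi
    rw [List.range_succ_eq_map]
    simp only [List.map_cons, List.map_map, dseqC]
    congr 1
    rw [← ih (hi - 1)]
    apply List.map_congr_left
    intro a _
    simp only [Function.comp]
    omega

theorem EnN_cons_eq (c : Nat) (cs : List Nat) (m : Nat) :
    EnN (c :: cs) (m + 1) =
      (dseqC (min (m + 1) c) (min (m + 1) c + 1 - (m + 1 - cs.sum))).flatMap
        (fun k => (EnN cs (m + 1 - k)).map (fun u => List.replicate k 0 ++ u.map (· + 1))) := by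
  rw [EnN, range_map_sub]

theorem EnN_empty (caps : List Nat) : ∀ m, caps.sum < m → EnN caps m = [] := by
  induction caps with
  | nil =>
    intro m h
    cases m with
    | zero => omega
    | succ m => rfl
  | cons c cs ih =>
    intro m h
    cases m with
    | zero => omega
    | succ m =>
      simp only [EnN]
      rw [List.flatMap_eq_nil_iff]
      intro k hk
      simp only [List.mem_map, List.mem_range] at hk
      obtain ⟨t, ht, rfl⟩ := hk
      rw [ih]
      · rfl
      · simp at h ⊢
        omega

theorem EnN_head (caps : List Nat) : ∀ m, m ≤ caps.sum → (EnN caps m).head? = some (tkN 0 m caps) := by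
  induction caps with
  | nil =>
    intro m h
    have : m = 0 := by simpa using h
    subst this
    rfl
  | cons c cs ih =>
    intro m h
    cases m with
    | zero =>
      simp [EnN, tkN, tkN_zero]
    | succ m =>
      have hsum : m + 1 ≤ c + cs.sum := by simpa using h
      have hlo : min (m + 1) c + 1 - (m + 1 - cs.sum) = (min (m + 1) c - (m + 1 - cs.sum)) + 1 := by omega
      rw [EnN_cons_eq, hlo, dseqC]
      have hsub : m + 1 - min (m + 1) c ≤ cs.sum := by omega
      have hne : EnN cs (m + 1 - min (m + 1) c) ≠ [] := by
        intro hnil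
        have := ih _ hsub
        rw [hnil] at this
        simp at this
      rw [List.flatMap_cons, List.head?_append]
      cases hE : EnN cs (m + 1 - min (m + 1) c) with
      | nil => exact absurd hE hne
      | cons y ys =>
        have hh := ih _ hsub
        rw [hE] at hh
        simp at hh
        simp [hh]
        rw [tkN]
        have hs := tkN_shift cs 0 1 (m + 1 - min (m + 1) c)
        simp only [Nat.zero_add] at hs
        rw [hs]

theorem EnN_ne_nil (caps : List Nat) (m : Nat) (h : m ≤ caps.sum) : EnN caps m ≠ [] := by
  intro hnil
  have := EnN_head caps m h
  rw [hnil] at this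
  simp at this

theorem EnN_card (caps : List Nat) : ∀ R m, m ≤ R → (EnN caps m).length ≤ (caps.map (fun c => min c R + 1)).prod := by
  induction caps with
  | nil =>
    intro R m _
    cases m <;> simp [EnN]
  | cons c cs ih =>
    intro R m hm
    cases m with
    | zero =>
      simp only [EnN, List.length_cons, List.length_nil, List.map_cons, List.prod_cons]
      have h1 : 1 ≤ (cs.map (fun c => min c R + 1)).prod := by
        apply Nat.one_le_iff_ne_zero.mpr
        apply List.prod_ne_zero
        intro h0
        simp at h0
      calc 0 + 1 ≤ 1 * 1 := by omega
        _ ≤ (min c R + 1) * (cs.map (fun c => min c R + 1)).prod := by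
            exact Nat.mul_le_mul (by omega) h1
      
    | succ m =>
      simp only [EnN, List.length_flatMap, List.map_map, List.map_cons, List.prod_cons]
      have hterm : ∀ x ∈ (List.range (min (m + 1) c + 1 - (m + 1 - cs.sum))).map
          ((fun k => ((EnN cs (m + 1 - k)).map (fun u => List.replicate k 0 ++ u.map (· + 1))).length) ∘ (fun t => min (m + 1) c - t)),
          x ≤ (cs.map (fun c => min c R + 1)).prod := by
        intro x hx
        simp only [List.mem_map, Function.comp] at hx
        obtain ⟨t, _, rfl⟩ := hx
        simp only [List.length_map]
        exact ih R _ (by omega)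
      calc _ ≤ ((List.range (min (m + 1) c + 1 - (m + 1 - cs.sum))).map
          ((fun k => ((EnN cs (m + 1 - k)).map (fun u => List.replicate k 0 ++ u.map (· + 1))).length) ∘ (fun t => min (m + 1) c - t))).length * (cs.map (fun c => min c R + 1)).prod := by
            apply List.sum_le_card_nsmul
            exact hterm
        _ ≤ (min c R + 1) * (cs.map (fun c => min c R + 1)).prod := by
            apply Nat.mul_le_mul_right
            simp
            omega

theorem EnN_trailing_zeros (l₂ : List Nat) (hz : ∀ t ∈ l₂, t = 0) (l₁ : List Nat) : ∀ m, EnN (l₁ ++ l₂) m = EnN l₁ m := by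
  induction l₁ with
  | nil =>
    intro m
    simp only [List.nil_append]
    induction l₂ with
    | nil => rfl
    | cons z zs ihz =>
      cases m with
      | zero => rfl
      | succ m =>
        have hz0 : z = 0 := hz z (by simp)
        have hzs : zs.sum = 0 := by
          apply List.sum_eq_zero
          intro t ht
          exact hz t (by simp [ht])
        subst hz0
        simp only [EnN, hzs]
        have : min (m + 1) 0 + 1 - (m + 1 - 0) = 0 := by omega
        rw [this]
        rfl
  | cons c cs ih =>
    intro m
    cases m with
    | zero => rfl
    | succ m =>
      have hmz : ∀ t ∈ cs ++ l₂, t = 0 → True := fun _ _ _ => trivial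
      have hsum : (cs ++ l₂).sum = cs.sum := by
        have : l₂.sum = 0 := by
          apply List.sum_eq_zero
          exact hz
        simp [this]
      simp only [List.cons_append, EnN, hsum]
      congr 1
      funext k
      rw [ih]

theorem getD_map_succ (u : List Nat) (i : Nat) (hi : i < u.length) :
    (u.map (· + 1)).getD i 0 = u.getD i 0 + 1 := by
  rw [List.getD_eq_getElem?_getD, List.getD_eq_getElem?_getD, List.getElem?_map]
  rw [List.getElem?_eq_getElem hi]
  rfl

theorem stp_inner (c : Nat) (cs : List Nat) (k m : Nat) (u v : List Nat)
    (_hk : k ≤ c) (_hm : m ≤ cs.sum) (hu : u.length = m)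
    (h : stpN cs m u = some v) :
    stpN (c :: cs) (m + k) (List.replicate k 0 ++ u.map (· + 1)) =
      some (List.replicate k 0 ++ v.map (· + 1)) := by
  unfold stpN at h
  set Mcs := (tkN 0 m cs.reverse).map (fun t => cs.length - 1 - t) with hMcs_def
  cases hfm : pvFindMismatch u.reverse Mcs with
  | none => rw [hfm] at h; simp at h
  | some p =>
    rw [hfm] at h
    simp only [Option.some.injEq] at h
    -- facts about p
    have hlen_rev : u.reverse.length = m := by simp [hu]
    have hp := fm_some_lt u.reverse Mcs p hfm
    have hp1 : p.1 < m := by omega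
    set i₀ := m - 1 - p.1 with hi₀
    set w := u.getD i₀ 0 + 1 with hw
    set s₀ := tkN w (m - i₀) (cs.drop w) with hs₀
    -- decompose the full maximal chain as Mcs.map (+1) ++ tail
    have hrev : (c :: cs).reverse = cs.reverse ++ [c] := by simp
    have hD : tkN 0 (m + k) cs.reverse = tkN 0 m cs.reverse ++ (tkN 0 (m + k) cs.reverse).drop m := by
      rw [← tkN_take cs.reverse 0 (m + k) m (by omega)]
      exact (List.take_append_drop m _).symm
    have hmap1 : (tkN 0 m cs.reverse).map (fun t => (c :: cs).length - 1 - t) = Mcs.map (· + 1) := by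
      rw [hMcs_def, List.map_map]
      apply List.map_congr_left
      intro a ha
      have := tkN_entry_lt cs.reverse 0 m a ha
      simp only [List.length_reverse] at this
      simp only [Function.comp_apply, List.length_cons]
      omega
    have hxrev : (List.replicate k 0 ++ u.map (· + 1)).reverse = u.reverse.map (· + 1) ++ List.replicate k 0 := by
      simp [List.reverse_append, List.map_reverse]
    have hfm2 : pvFindMismatch (u.reverse.map (· + 1)) (Mcs.map (· + 1)) = some (p.1, p.2 + 1) := by
      rw [fm_map_succ, hfm]
      rfl
    have hfm3 : pvFindMismatch ((List.replicate k 0 ++ u.map (· + 1)).reverse)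
        ((tkN 0 (m + k) ((c :: cs).reverse)).map (fun t => (c :: cs).length - 1 - t)) = some (p.1, p.2 + 1) := by
      rw [hxrev, hrev, tkN_append, hD]
      simp only [List.map_append, List.append_assoc]
      rw [hmap1]
      exact fm_some_append _ _ _ _ _ hfm2
    -- unfold the full step
    unfold stpN
    rw [hfm3]
    simp only [Option.some.injEq]
    have humlen : (u.map (· + 1)).length = m := by simp [hu]
    have hieq : m + k - 1 - p.1 = k + i₀ := by omega
    rw [hieq]
    have hgetD : (List.replicate k 0 ++ u.map (· + 1)).getD (k + i₀) 0 = u.getD i₀ 0 + 1 := by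
      rw [List.getD_append_right _ _ _ _ (by simp)]
      simp only [List.length_replicate]
      have he : k + i₀ - k = i₀ := by omega
      rw [he]
      exact getD_map_succ u i₀ (by omega)
    rw [hgetD]
    have hdrop1 : (c :: cs).drop (u.getD i₀ 0 + 1 + 1) = cs.drop w := by
      simp [hw]
    have hrem : m + k - (k + i₀) = m - i₀ := by omega
    rw [hdrop1, hrem]
    have hs : tkN (u.getD i₀ 0 + 1 + 1) (m - i₀) (cs.drop w) = s₀.map (· + 1) := by
      rw [hs₀, hw]
      exact tkN_shift (cs.drop (u.getD i₀ 0 + 1)) (u.getD i₀ 0 + 1) 1 (m - i₀)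
    rw [hs]
    have htake : (List.replicate k 0 ++ u.map (· + 1)).take (k + i₀) = List.replicate k 0 ++ (u.take i₀).map (· + 1) := by
      rw [List.take_append, List.take_replicate, List.map_take]
      simp only [List.length_replicate]
      have h1 : k + i₀ - k = i₀ := by omega
      have h2 : min (k + i₀) k = k := by omega
      rw [h1, h2]
    have hdrop2 : (List.replicate k 0 ++ u.map (· + 1)).drop (k + i₀ + (s₀.map (· + 1)).length) = (u.drop (i₀ + s₀.length)).map (· + 1) := by
      rw [List.drop_append, List.drop_replicate, List.map_drop]
      simp only [List.length_replicate, List.length_map]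
      have h1 : k + i₀ + s₀.length - k = i₀ + s₀.length := by omega
      have h2 : k - (k + i₀ + s₀.length) = 0 := by omega
      rw [h1, h2]
      simp
    rw [htake, hdrop2]
    rw [← h]
    simp [List.append_assoc, List.map_append]

theorem fm_cons_ne (a b : Nat) (as bs : List Nat) (h : a ≠ b) :
    pvFindMismatch (a :: as) (b :: bs) = some (0, b) := by
  simp [pvFindMismatch, h]

theorem stpN_none_iff (caps : List Nat) (rem : Nat) (x : List Nat) :
    stpN caps rem x = none ↔ pvFindMismatch x.reverse ((tkN 0 rem caps.reverse).map (fun t => caps.length - 1 - t)) = none := by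
  unfold stpN
  cases pvFindMismatch x.reverse ((tkN 0 rem caps.reverse).map (fun t => caps.length - 1 - t)) with
  | none => simp
  | some p => simp

theorem Mcs_eq_urev (cs : List Nat) (m : Nat) (u : List Nat) (hm : m ≤ cs.sum) (hu : u.length = m)
    (h : stpN cs m u = none) :
    u.reverse = (tkN 0 m cs.reverse).map (fun t => cs.length - 1 - t) := by
  have hfm := (stpN_none_iff cs m u).mp h
  apply fm_none_eq _ _ hfm
  simp [hu, tkN_length, hm]

theorem stp_boundary (c : Nat) (cs : List Nat) (k m : Nat) (u : List Nat)
    (hk : 1 ≤ k) (hkc : k ≤ c) (hm : m + 1 ≤ cs.sum) (hu : u.length = m)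
    (h : stpN cs m u = none) :
    stpN (c :: cs) (m + k) (List.replicate k 0 ++ u.map (· + 1)) =
      some (List.replicate (k - 1) 0 ++ (tkN 0 (m + 1) cs).map (· + 1)) := by
  set Mcs := (tkN 0 m cs.reverse).map (fun t => cs.length - 1 - t) with hMcs_def
  have hueq : u.reverse = Mcs := Mcs_eq_urev cs m u (by omega) hu h
  -- split tkN 0 (m+1) cs.reverse as tkN 0 m cs.reverse ++ [e]
  have hlen1 : (tkN 0 (m + 1) cs.reverse).length = m + 1 := by
    rw [tkN_length]
    simp
    omega
  have hsplit1 : tkN 0 (m + 1) cs.reverse = tkN 0 m cs.reverse ++ (tkN 0 (m + 1) cs.reverse).drop m := by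
    rw [← tkN_take cs.reverse 0 (m + 1) m (by omega)]
    exact (List.take_append_drop m _).symm
  have hlenm : (tkN 0 m cs.reverse).length = m := by
    rw [tkN_length]
    simp
    omega
  have hdlen : ((tkN 0 (m + 1) cs.reverse).drop m).length = 1 := by
    simp [hlen1]
  obtain ⟨e, he⟩ : ∃ e, (tkN 0 (m + 1) cs.reverse).drop m = [e] := by
    cases hd : (tkN 0 (m + 1) cs.reverse).drop m with
    | nil => rw [hd] at hdlen; simp at hdlen
    | cons a t =>
      rw [hd] at hdlen
      simp at hdlen
      exact ⟨a, by rw [hdlen]⟩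
  have helt : e < cs.length := by
    have hmem : e ∈ tkN 0 (m + 1) cs.reverse := by
      have : e ∈ (tkN 0 (m + 1) cs.reverse).drop m := by rw [he]; simp
      exact List.mem_of_mem_drop this
    have := tkN_entry_lt cs.reverse 0 (m + 1) e hmem
    simpa using this
  -- split the big chain
  have hsplit2 : tkN 0 (m + k) cs.reverse = tkN 0 (m + 1) cs.reverse ++ (tkN 0 (m + k) cs.reverse).drop (m + 1) := by
    rw [← tkN_take cs.reverse 0 (m + k) (m + 1) (by omega)]
    exact (List.take_append_drop (m + 1) _).symm
  have hmap1 : (tkN 0 m cs.reverse).map (fun t => (c :: cs).length - 1 - t) = Mcs.map (· + 1) := by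
    rw [hMcs_def, List.map_map]
    apply List.map_congr_left
    intro a ha
    have := tkN_entry_lt cs.reverse 0 m a ha
    simp only [List.length_reverse] at this
    simp only [Function.comp_apply, List.length_cons]
    omega
  have hxrev : (List.replicate k 0 ++ u.map (· + 1)).reverse = Mcs.map (· + 1) ++ (0 :: List.replicate (k - 1) 0) := by
    have hrep : (List.replicate k (0 : Nat)).reverse = 0 :: List.replicate (k - 1) 0 := by
      cases k with
      | zero => omega
      | succ k' => rw [List.reverse_replicate, List.replicate_succ]; simp
    rw [List.reverse_append, ← List.map_reverse, hueq, hrep]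
  have hfm3 : pvFindMismatch ((List.replicate k 0 ++ u.map (· + 1)).reverse)
      ((tkN 0 (m + k) ((c :: cs).reverse)).map (fun t => (c :: cs).length - 1 - t)) = some (m, cs.length - e) := by
    have hcrev : (c :: cs).reverse = cs.reverse ++ [c] := by simp
    rw [hcrev, tkN_append, hsplit2, hsplit1, hxrev]
    simp only [List.map_append, List.append_assoc, he]
    rw [hmap1]
    rw [fm_append_eq]
    have hcne : (0 : Nat) ≠ (c :: cs).length - 1 - e := by
      simp only [List.length_cons]
      omega
    have hfe : (c :: cs).length - 1 - e = cs.length - e := by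
      simp only [List.length_cons]
      omega
    simp only [List.map_cons, List.map_nil, List.cons_append, List.nil_append]
    rw [fm_cons_ne _ _ _ _ hcne, hfe]
    have hmlen : (Mcs.map (· + 1)).length = m := by
      simp [hMcs_def, hlenm]
    simp [hmlen]
  unfold stpN
  rw [hfm3]
  simp only [Option.some.injEq]
  have hieq : m + k - 1 - m = k - 1 := by omega
  rw [hieq]
  have hgetD : (List.replicate k 0 ++ u.map (· + 1)).getD (k - 1) 0 = 0 := by
    rw [List.getD_eq_getElem?_getD, List.getElem?_append_left (by simp; omega)]
    simp [show 0 < k by omega]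
  rw [hgetD]
  have hdrop1 : (c :: cs).drop (0 + 1) = cs := by simp
  rw [hdrop1]
  have hrem : m + k - (k - 1) = m + 1 := by omega
  rw [hrem]
  have hs : tkN (0 + 1) (m + 1) cs = (tkN 0 (m + 1) cs).map (· + 1) := tkN_shift cs 0 1 (m + 1)
  rw [hs]
  have hslen : ((tkN 0 (m + 1) cs).map (· + 1)).length = m + 1 := by
    simp [tkN_length]
    omega
  have htake : (List.replicate k 0 ++ u.map (· + 1)).take (k - 1) = List.replicate (k - 1) 0 := by
    rw [List.take_append, List.take_replicate]
    simp only [List.length_replicate]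
    have h1 : min (k - 1) k = k - 1 := by omega
    have h2 : k - 1 - k = 0 := by omega
    rw [h1, h2]
    simp
  have hdrop2 : (List.replicate k 0 ++ u.map (· + 1)).drop (k - 1 + ((tkN 0 (m + 1) cs).map (· + 1)).length) = [] := by
    rw [hslen]
    apply List.drop_eq_nil_of_le
    simp [hu]
    omega
  rw [htake, hdrop2]
  simp

theorem stp_last (c : Nat) (cs : List Nat) (k m : Nat) (u : List Nat)
    (hkc : k ≤ c) (hm : m ≤ cs.sum) (hlo : m + k - cs.sum = k)
    (hu : u.length = m) (h : stpN cs m u = none) :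
    stpN (c :: cs) (m + k) (List.replicate k 0 ++ u.map (· + 1)) = none := by
  set Mcs := (tkN 0 m cs.reverse).map (fun t => cs.length - 1 - t) with hMcs_def
  have hueq : u.reverse = Mcs := Mcs_eq_urev cs m u hm hu h
  have hmin : min (m + k) cs.sum = m := by omega
  have hten : (tkN 0 (m + k) cs.reverse).length = m := by
    rw [tkN_length]
    simpa using hmin
  have ht1 : tkN 0 (m + k) cs.reverse = tkN 0 m cs.reverse := by
    rw [← tkN_take cs.reverse 0 (m + k) m (by omega)]
    exact (List.take_of_length_le (by omega)).symm
  have hmap1 : (tkN 0 m cs.reverse).map (fun t => (c :: cs).length - 1 - t) = Mcs.map (· + 1) := by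
    rw [hMcs_def, List.map_map]
    apply List.map_congr_left
    intro a ha
    have := tkN_entry_lt cs.reverse 0 m a ha
    simp only [List.length_reverse] at this
    simp only [Function.comp_apply, List.length_cons]
    omega
  have htk2 : tkN (0 + cs.reverse.length) (m + k - cs.reverse.sum) [c] = List.replicate k cs.length := by
    simp only [tkN, List.append_nil, List.sum_reverse, List.length_reverse, hlo, Nat.zero_add]
    rw [min_eq_left hkc]
  rw [stpN_none_iff]
  have hcrev : (c :: cs).reverse = cs.reverse ++ [c] := by simp
  rw [hcrev, tkN_append, ht1]
  simp only [List.map_append]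
  rw [hmap1, htk2]
  have hmc : (List.replicate k cs.length).map (fun t => (c :: cs).length - 1 - t) = List.replicate k 0 := by
    simp only [List.map_replicate, List.length_cons]
    congr 1
    omega
  rw [hmc]
  apply fm_self
  rw [List.reverse_append, ← List.map_reverse, hueq, List.reverse_replicate]

theorem fm_nil_left (b : List Nat) : pvFindMismatch [] b = none := by
  cases b <;> rfl

theorem stpN_nil (caps : List Nat) (m : Nat) : stpN caps m [] = none := by
  rw [stpN_none_iff]
  exact fm_nil_left _

def blkF (cs : List Nat) (M j : Nat) : List (List Nat) :=
  (EnN cs (M - j)).map (fun u => List.replicate j 0 ++ u.map (· + 1))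

theorem chain_map_g (c : Nat) (cs : List Nat) (k m' : Nat) (hk : k ≤ c) (hm : m' ≤ cs.sum) :
    ∀ l : List (List Nat), (∀ u ∈ l, u.length = m') →
    List.IsChain (fun a b => stpN cs m' a = some b) l →
    List.IsChain (fun a b => stpN (c :: cs) (m' + k) a = some b)
      (l.map (fun u => List.replicate k 0 ++ u.map (· + 1))) := by
  intro l
  induction l with
  | nil => intro _ _; simp
  | cons a t ih =>
    intro hlen hch
    cases t with
    | nil => simp
    | cons b t' =>
      rw [List.isChain_cons_cons] at hch
      simp only [List.map_cons]
      rw [List.isChain_cons_cons]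
      constructor
      · exact stp_inner c cs k m' a b hk hm (hlen a (by simp)) hch.1
      · have := ih (fun u hu => hlen u (by simp [hu])) hch.2
        simpa using this

theorem blocks_aux (c : Nat) (cs : List Nat) (M : Nat)
    (hsub : ∀ m', m' ≤ cs.sum → List.IsChain (fun a b => stpN cs m' a = some b) (EnN cs m') ∧
        (∀ x, (EnN cs m').getLast? = some x → stpN cs m' x = none)) :
    ∀ n k, M - cs.sum ≤ k → k ≤ min M c → k + 1 - (M - cs.sum) = n →
      ((dseqC k n).flatMap (blkF cs M)).head? = some (List.replicate k 0 ++ (tkN 0 (M - k) cs).map (· + 1)) ∧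
      List.IsChain (fun a b => stpN (c :: cs) M a = some b) ((dseqC k n).flatMap (blkF cs M)) ∧
      (∀ x, ((dseqC k n).flatMap (blkF cs M)).getLast? = some x → stpN (c :: cs) M x = none) := by
  intro n
  induction n with
  | zero => intro k hlo hhi hn; omega
  | succ n' ih =>
    intro k hlo hhi hn
    have hm' : M - k ≤ cs.sum := by omega
    have hMk : M - k + k = M := by omega
    have hEne : EnN cs (M - k) ≠ [] := EnN_ne_nil cs (M - k) hm'
    have hhead : (blkF cs M k).head? = some (List.replicate k 0 ++ (tkN 0 (M - k) cs).map (· + 1)) := by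
      rw [blkF, List.head?_map, EnN_head cs (M - k) hm']
      rfl
    have hblkne : blkF cs M k ≠ [] := by
      intro h0
      rw [h0] at hhead
      simp at hhead
    have hchainblk : List.IsChain (fun a b => stpN (c :: cs) M a = some b) (blkF cs M k) := by
      rw [blkF]
      have := chain_map_g c cs k (M - k) (by omega) hm' (EnN cs (M - k))
        (fun u hu => EnN_len cs (M - k) u hu) (hsub (M - k) hm').1
      rw [hMk] at this
      exact this
    rw [dseqC, List.flatMap_cons]
    cases n' with
    | zero =>
      have hk : k = M - cs.sum := by omega
      simp only [dseqC, List.flatMap_nil, List.append_nil]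
      refine ⟨hhead, hchainblk, ?_⟩
      intro x hx
      rw [blkF, List.getLast?_map] at hx
      cases hLast : (EnN cs (M - k)).getLast? with
      | none => rw [hLast] at hx; simp at hx
      | some u =>
        rw [hLast] at hx
        simp only [Option.map_some, Option.some.injEq] at hx
        subst hx
        have hu : u.length = M - k := EnN_len cs (M - k) u (List.mem_of_getLast? hLast)
        have hnone := (hsub (M - k) hm').2 u hLast
        have := stp_last c cs k (M - k) u (by omega) hm' (by omega) hu hnone
        rw [hMk] at this
        exact this
    | succ n'' =>
      have hk1 : 1 ≤ k := by omega
      obtain ⟨ihh, ihc, ihl⟩ := ih (k - 1) (by omega) (by omega) (by omega)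
      have hrestne : (dseqC (k - 1) (n'' + 1)).flatMap (blkF cs M) ≠ [] := by
        intro h0
        rw [h0] at ihh
        simp at ihh
      refine ⟨?_, ?_, ?_⟩
      · rw [List.head?_append, hhead]
        rfl
      · rw [List.isChain_append]
        refine ⟨hchainblk, ihc, ?_⟩
        intro x hx y hy
        rw [blkF, List.getLast?_map] at hx
        cases hLast : (EnN cs (M - k)).getLast? with
        | none => rw [hLast] at hx; simp at hx
        | some u =>
          rw [hLast] at hx
          simp only [Option.map_some, Option.mem_def, Option.some.injEq] at hx
          subst hx
          rw [ihh] at hy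
          simp only [Option.mem_def, Option.some.injEq] at hy
          subst hy
          have hu : u.length = M - k := EnN_len cs (M - k) u (List.mem_of_getLast? hLast)
          have hnone := (hsub (M - k) hm').2 u hLast
          have harg1 : k ≤ c := le_trans hhi (Nat.min_le_right M c)
          have harg2 : M - k + 1 ≤ cs.sum := by omega
          have hb := stp_boundary c cs k (M - k) u hk1 harg1 harg2 hu hnone
          rw [hMk] at hb
          have he : M - k + 1 = M - (k - 1) := by omega
          rw [he] at hb
          exact hb
      · intro x hx
        rw [List.getLast?_append] at hx
        cases hr : ((dseqC (k - 1) (n'' + 1)).flatMap (blkF cs M)).getLast? with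
        | none =>
          exfalso
          exact hrestne (List.getLast?_eq_none_iff.mp hr)
        | some y =>
          rw [hr] at hx
          simp only [Option.some_or, Option.some.injEq] at hx
          subst hx
          exact ihl y hr

theorem EnN_chain (caps : List Nat) : ∀ m, m ≤ caps.sum →
    List.IsChain (fun a b => stpN caps m a = some b) (EnN caps m) ∧
    (∀ x, (EnN caps m).getLast? = some x → stpN caps m x = none) := by
  induction caps with
  | nil =>
    intro m hm
    have h0 : m = 0 := by simpa using hm
    subst h0
    refine ⟨by simp [EnN], ?_⟩
    intro x hx
    simp [EnN] at hx
    subst hx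
    exact stpN_nil [] 0
  | cons c cs ih =>
    intro m hm
    cases m with
    | zero =>
      refine ⟨by simp [EnN], ?_⟩
      intro x hx
      simp [EnN] at hx
      subst hx
      exact stpN_nil _ 0
    | succ m' =>
      have hsum : m' + 1 ≤ c + cs.sum := by simpa using hm
      have hblocks := blocks_aux c cs (m' + 1) ih (min (m' + 1) c + 1 - (m' + 1 - cs.sum)) (min (m' + 1) c) (by omega) (le_refl _) rfl
      have hE : EnN (c :: cs) (m' + 1) = (dseqC (min (m' + 1) c) (min (m' + 1) c + 1 - (m' + 1 - cs.sum))).flatMap (blkF cs (m' + 1)) := by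
        rw [EnN_cons_eq]
        rfl
      rw [hE]
      exact ⟨hblocks.2.1, hblocks.2.2⟩

theorem loop_run (values counts : List Int) (r' : Nat) :
    ∀ (L : List (List Nat)) (x : List Nat) (fuel : Nat),
      List.IsChain (fun a b => stpN (counts.map Int.toNat) r' a = some b) (x :: L) →
      (∀ y, (x :: L).getLast? = some y → stpN (counts.map Int.toNat) r' y = none) →
      (x :: L).length ≤ fuel →
      pvLoopA values counts r' counts.length fuel x =
        (x :: L).map (fun u => u.map (fun i => values.getD i 0)) := by
  intro L
  induction L with
  | nil =>
    intro x fuel _ hlast hfuel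
    cases fuel with
    | zero => simp at hfuel
    | succ f =>
      rw [pvLoopA]
      rw [pvStepA_eq_stpN, hlast x rfl]
      simp
  | cons b L' ih =>
    intro x fuel hchain hlast hfuel
    cases fuel with
    | zero => simp at hfuel
    | succ f =>
      rw [List.isChain_cons_cons] at hchain
      rw [pvLoopA]
      rw [pvStepA_eq_stpN, hchain.1]
      have hlast' : ∀ y, (b :: L').getLast? = some y → stpN (counts.map Int.toNat) r' y = none := by
        intro y hy
        exact hlast y (by rw [List.getLast?_cons_cons]; exact hy)
      have hrec := ih b f hchain.2 hlast' (by simpa using Nat.le_of_succ_le_succ hfuel)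
      simp [hrec]

theorem pvRecB_eq (items : List (Int × Nat)) : ∀ m pref,
    pvRecB (pvAnnot items) m pref =
      (EnN (items.map (fun p => p.2)) m).map
        (fun u => pref ++ u.map (fun t => (items.map (fun p => p.1)).getD t 0)) := by
  induction items with
  | nil =>
    intro m pref
    cases m with
    | zero => simp [pvAnnot, pvRecB, EnN]
    | succ m => simp [pvAnnot, pvRecB, EnN]
  | cons vc rest ih =>
    intro m pref
    obtain ⟨v, cap⟩ := vc
    cases m with
    | zero => simp [pvAnnot, pvRecB, EnN]
    | succ m =>
      simp only [pvAnnot, pvRecB, List.map_cons, EnN, List.flatMap_map]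
      rw [List.map_flatMap]
      congr 1
      funext a
      rw [ih, List.map_map]
      congr 1
      funext u
      simp [List.map_append, List.map_replicate, List.map_map,
        List.getD_cons_zero, Function.comp, List.append_assoc]

theorem fuel_eq_prod (counts : List Int) (r' : Nat) :
    counts.foldl (fun a c => a * (min c.toNat r' + 1)) 1 =
      ((counts.map Int.toNat).map (fun c => min c r' + 1)).prod := by
  have aux : ∀ init, counts.foldl (fun a c => a * (min c.toNat r' + 1)) init =
      init * ((counts.map Int.toNat).map (fun c => min c r' + 1)).prod := by
    induction counts with
    | nil => intro init; simp
    | cons c cs ihc =>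
      intro init
      simp only [List.foldl_cons, List.map_cons, List.prod_cons, ihc]
      ring
  have := aux 1
  simpa using this

theorem EnN_zero (l : List Nat) : EnN l 0 = [[]] := by
  cases l <;> rfl

theorem zip_map_snd (l₁ : List Int) : ∀ l₂ : List Int, (l₁.zip l₂).map Prod.snd = l₂.take l₁.length := by
  induction l₁ with
  | nil => intro l₂; simp
  | cons a t ih =>
    intro l₂
    cases l₂ with
    | nil => simp
    | cons b t₂ => simp [ih]

theorem zip_map_fst (l₁ : List Int) : ∀ l₂ : List Int, (l₁.zip l₂).map Prod.fst = l₁.take l₂.length := by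
  induction l₁ with
  | nil => intro l₂; simp
  | cons a t ih =>
    intro l₂
    cases l₂ with
    | nil => simp
    | cons b t₂ => simp [ih]

theorem sum_take_le (l : List Nat) (n : Nat) : (l.take n).sum ≤ l.sum := by
  conv_rhs => rw [← List.take_append_drop n l]
  rw [List.sum_append]
  omega

theorem getD_take (l : List Int) (n t : Nat) (d : Int) (h : t < n) : (l.take n).getD t d = l.getD t d := by
  rw [List.getD_eq_getElem?_getD, List.getD_eq_getElem?_getD, List.getElem?_take]
  simp [h]

theorem capsZ_eq (values counts : List Int) :
    (pvItems values counts).map (fun p => p.2) = ((counts.map Int.toNat).take values.length) := by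
  unfold pvItems
  rw [List.map_map]
  have h1 : ((fun p : Int × Nat => p.2) ∘ fun (p : Int × Int) => (p.1, p.2.toNat)) = (Int.toNat ∘ Prod.snd) := rfl
  rw [h1, ← List.map_map, zip_map_snd, List.map_take]

theorem itemsV_eq (values counts : List Int) :
    (pvItems values counts).map (fun p => p.1) = values.take counts.length := by
  unfold pvItems
  rw [List.map_map]
  have : ((fun p : Int × Nat => p.1) ∘ fun (p : Int × Int) => (p.1, p.2.toNat)) = (Prod.fst : Int × Int → Int) := rfl
  rw [this, zip_map_fst]

theorem main_spec (values counts : List Int) (r : Int)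
    (hpre : Pre_unique_combinations_from_value_counts values counts r) :
    unique_combinations_from_value_counts values counts r =
      unique_combinations_from_value_counts_alt values counts r := by
  obtain ⟨hr0, hcase⟩ := hpre
  unfold unique_combinations_from_value_counts unique_combinations_from_value_counts_alt
  rw [if_neg (by omega : ¬ r < 0)]
  rw [pvRecB_eq]
  rw [pvTakeRC_eq_tkN, tkN_length]
  rw [capsZ_eq, itemsV_eq]
  by_cases hfeas : (counts.map Int.toNat).sum < r.toNat
  · -- infeasible: both empty
    rw [if_pos (by omega)]
    have hz : (((counts.map Int.toNat).take values.length)).sum < r.toNat :=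
      lt_of_le_of_lt (sum_take_le _ _) hfeas
    rw [EnN_empty _ _ hz]
    simp
  · -- feasible
    rw [if_neg (by omega)]
    have hfe : r.toNat ≤ (counts.map Int.toNat).sum := by omega
    -- run the loop along the enumeration
    obtain ⟨hchain, hlast⟩ := EnN_chain (counts.map Int.toNat) r.toNat hfe
    have hhead := EnN_head (counts.map Int.toNat) r.toNat hfe
    cases hE : EnN (counts.map Int.toNat) r.toNat with
    | nil => rw [hE] at hhead; simp at hhead
    | cons x T =>
      rw [hE] at hhead hchain hlast
      simp only [List.head?_cons, Option.some.injEq] at hhead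
      have hfuel : (x :: T).length ≤ counts.foldl (fun a c => a * (min c.toNat r.toNat + 1)) 1 := by
        rw [fuel_eq_prod]
        have := EnN_card (counts.map Int.toNat) r.toNat r.toNat (le_refl _)
        rw [hE] at this
        exact this
      have hrun := loop_run values counts r.toNat T x
        (counts.foldl (fun a c => a * (min c.toNat r.toNat + 1)) 1) hchain hlast hfuel
      rw [← hhead, hrun]
      by_cases hz : r.toNat = 0
      · rw [hz] at hE ⊢
        have h0 : EnN (counts.map Int.toNat) 0 = [[]] := EnN_zero _
        rw [h0] at hE
        cases hE
        rw [EnN_zero]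
        simp
      · -- r ≥ 1 here
        have hEeq : EnN ((counts.map Int.toNat).take values.length) r.toNat = EnN (counts.map Int.toNat) r.toNat := by
          by_cases hlen : counts.length ≤ values.length
          · rw [List.take_of_length_le (by simpa using hlen)]
          · have hall : ∀ i : Nat, i < counts.length → (0 : Int) < counts.getD i 0 → i < values.length := by
              rcases hcase with h | h | h
              · omega
              · omega
              · exact h
            have hzeros : ∀ t ∈ (counts.map Int.toNat).drop values.length, t = 0 := by
              intro t ht
              rw [List.mem_iff_getElem] at ht
              obtain ⟨j, hj, hjt⟩ := ht
              rw [List.getElem_drop] at hjt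
              rw [List.getElem_map] at hjt
              have hlt : values.length + j < counts.length := by
                simp at hj
                omega
              have hnpos : ¬ (0 : Int) < counts.getD (values.length + j) 0 := by
                intro hpos
                have := hall _ hlt hpos
                omega
              rw [List.getD_eq_getElem?_getD, List.getElem?_eq_getElem hlt] at hnpos
              simp at hnpos
              omega
            conv_rhs => rw [← List.take_append_drop values.length (counts.map Int.toNat)]
            rw [EnN_trailing_zeros _ hzeros]
        rw [hEeq, hE]
        apply List.map_congr_left
        intro u hu
        have hu' : u ∈ EnN (counts.map Int.toNat) r.toNat := by rw [hE]; exact hu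
        simp only [List.nil_append]
        apply List.map_congr_left
        intro t ht
        have hb := EnN_entry_lt _ _ _ _ hu' ht
        simp only [List.length_map] at hb
        exact (getD_take values counts.length t 0 hb).symm

-- ===== VERDICT =====
theorem unique_combinations_from_value_counts_spec : Claim_equal_unique_combinations_from_value_counts := by
  intro values counts r _ hpre
  unfold Spec_unique_combinations_from_value_counts
  exact main_spec values counts r hpre
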